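-- pv_equiv track=rewrite | github.com/Ag3497120/verantyx-v6 | arc/cross_world.py | _shape_match
-- ===== SOURCE A (Python) =====
-- from typing import List, Tuple, Optional, Dict, Set, FrozenSet
--
-- def _shape_match(sig_a, sig_b) -> Optional[str]:
--     """2つの形状シグネチャが変換で一致するか"""
--     if sig_a == sig_b:
--         return 'identity'
--     # flip_h
--     if sig_a:
--         max_c = max(c for r, c in sig_a)
--         flipped_h = tuple(sorted((r, max_c - c) for r, c in sig_a))
--         if flipped_h == sig_b:
--             return 'flip_h'
--     # flip_v
--     if sig_a:
--         max_r = max(r for r, c in sig_a)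
--         flipped_v = tuple(sorted((max_r - r, c) for r, c in sig_a))
--         if flipped_v == sig_b:
--             return 'flip_v'
--     # rot180
--     if sig_a:
--         max_r = max(r for r, c in sig_a)
--         max_c = max(c for r, c in sig_a)
--         rot180 = tuple(sorted((max_r - r, max_c - c) for r, c in sig_a))
--         if rot180 == sig_b:
--             return 'rot180'
--     # rot90
--     if sig_a:
--         max_r = max(r for r, c in sig_a)
--         rot90 = tuple(sorted((c, max_r - r) for r, c in sig_a))
--         if rot90 == sig_b:
--             return 'rot90'
--     # rot270
--     if sig_a:
--         max_c = max(c for r, c in sig_a)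
--         rot270 = tuple(sorted((max_c - c, r) for r, c in sig_a))
--         if rot270 == sig_b:
--             return 'rot270'
--     return None
-- ===== SOURCE B (Python) =====
-- def _shape_match(sig_a, sig_b):
--     """2つの形状シグネチャが変換で一致するか — sortedness precheck + multiset (count-dict)
--     comparison instead of sorting each transform: tuple(sorted(X)) == sig_b iff sig_b is a
--     nondecreasing sequence and X has the same multiset of cells as sig_b."""
--     if sig_a == sig_b:
--         return 'identity'
--     if not sig_a:
--         return None
--     if not all(x <= y for x, y in zip(sig_b, sig_b[1:])):
--         return None
--     target = {}
--     for p in sig_b: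
--         target[p] = target.get(p, 0) + 1
--     max_r = max(r for r, c in sig_a)
--     max_c = max(c for r, c in sig_a)
--     for name, f in (('flip_h', lambda r, c: (r, max_c - c)),
--                     ('flip_v', lambda r, c: (max_r - r, c)),
--                     ('rot180', lambda r, c: (max_r - r, max_c - c)),
--                     ('rot90', lambda r, c: (c, max_r - r)),
--                     ('rot270', lambda r, c: (max_c - c, r))):
--         counts = {}
--         for r, c in sig_a:
--             q = f(r, c)
--             counts[q] = counts.get(q, 0) + 1
--         if counts == target:
--             return name
--     return None
-- ===== Notes on version B (the rewrite author's own statement) =====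
-- stated objective: alternative
-- what changed: Replaces A's five sort-then-compare transform checks by a single lexicographic-sortedness precheck on sig_b plus count-dict (hash multiset) equality of each transform's mapped cells against sig_b's counts, so no transformed signature is ever sorted.
import Mathlib
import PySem

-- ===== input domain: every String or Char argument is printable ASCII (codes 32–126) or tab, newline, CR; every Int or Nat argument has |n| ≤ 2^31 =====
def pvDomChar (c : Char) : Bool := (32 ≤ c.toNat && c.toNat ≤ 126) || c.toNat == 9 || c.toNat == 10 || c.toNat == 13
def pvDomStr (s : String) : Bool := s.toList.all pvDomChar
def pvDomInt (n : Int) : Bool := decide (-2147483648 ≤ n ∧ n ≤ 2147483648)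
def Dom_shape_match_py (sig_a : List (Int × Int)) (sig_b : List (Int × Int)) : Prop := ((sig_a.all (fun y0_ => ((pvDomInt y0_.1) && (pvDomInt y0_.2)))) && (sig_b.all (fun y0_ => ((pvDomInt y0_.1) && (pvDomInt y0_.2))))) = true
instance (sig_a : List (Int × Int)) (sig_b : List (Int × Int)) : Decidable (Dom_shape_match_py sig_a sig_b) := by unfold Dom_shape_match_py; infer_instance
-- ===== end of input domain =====

-- B replaces A's five sort-then-compare transform checks by one sortedness precheck on
-- sig_b plus count-dict (hash multiset) equality of each transform's cells against
-- sig_b's counts — no transform is sorted; objective: alternative algorithm, same order of cost.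

-- max(xs) for a nonempty list; both Pythons only evaluate it under an 'if sig_a:' guard,
-- so the default 0 of getD is never reached on the inputs the ports use it on.
def pyMaxId (xs : List Int) : Int := (PySem.List.max? xs (fun x => x)).getD 0

-- ===== PORT A =====
-- the five transform blocks of A: max over the stated coordinate, then tuple(sorted(...))
def aFlipH (a : List (Int × Int)) : List (Int × Int) :=
  let max_c := pyMaxId (a.map Prod.snd)
  PySem.List.sorted2 (a.map fun p => (p.1, max_c - p.2)) Prod.fst Prod.snd
def aFlipV (a : List (Int × Int)) : List (Int × Int) :=
  let max_r := pyMaxId (a.map Prod.fst)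
  PySem.List.sorted2 (a.map fun p => (max_r - p.1, p.2)) Prod.fst Prod.snd
def aRot180 (a : List (Int × Int)) : List (Int × Int) :=
  let max_r := pyMaxId (a.map Prod.fst)
  let max_c := pyMaxId (a.map Prod.snd)
  PySem.List.sorted2 (a.map fun p => (max_r - p.1, max_c - p.2)) Prod.fst Prod.snd
def aRot90 (a : List (Int × Int)) : List (Int × Int) :=
  let max_r := pyMaxId (a.map Prod.fst)
  PySem.List.sorted2 (a.map fun p => (p.2, max_r - p.1)) Prod.fst Prod.snd
def aRot270 (a : List (Int × Int)) : List (Int × Int) :=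
  let max_c := pyMaxId (a.map Prod.snd)
  PySem.List.sorted2 (a.map fun p => (max_c - p.2, p.1)) Prod.fst Prod.snd

def shape_match_py (sig_a : List (Int × Int)) (sig_b : List (Int × Int)) : Option String :=
  if sig_a = sig_b then some "identity"
  else if sig_a ≠ [] ∧ aFlipH sig_a = sig_b then some "flip_h"
  else if sig_a ≠ [] ∧ aFlipV sig_a = sig_b then some "flip_v"
  else if sig_a ≠ [] ∧ aRot180 sig_a = sig_b then some "rot180"
  else if sig_a ≠ [] ∧ aRot90 sig_a = sig_b then some "rot90"
  else if sig_a ≠ [] ∧ aRot270 sig_a = sig_b then some "rot270"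
  else none

-- ===== PORT B =====
-- Python tuple comparison 'x <= y' on int pairs (lexicographic)
def pairLe (p q : Int × Int) : Bool := decide (p.1 < q.1) || (decide (p.1 = q.1) && decide (p.2 ≤ q.2))

-- 'd[p] = d.get(p, 0) + 1' loop building a count dict
def bCounts (xs : List (Int × Int)) : PySem.Dict (Int × Int) Int :=
  xs.foldl (fun d p => d.insert p (d.getD p 0 + 1)) PySem.Dict.empty

-- Python 'counts == target' on dicts: same size and every key of the first maps equally in the second
def pyDictEq (d e : PySem.Dict (Int × Int) Int) : Bool :=
  (d.items.length == e.items.length) && d.items.all (fun kv => e.get? kv.1 == some kv.2)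

def shape_match_py_alt (sig_a : List (Int × Int)) (sig_b : List (Int × Int)) : Option String :=
  if sig_a = sig_b then some "identity"
  else if sig_a = [] then none
  else if ¬ ((sig_b.zip (PySem.List.slice sig_b (some 1) none)).all fun q => pairLe q.1 q.2) then none
  else
    let target := bCounts sig_b
    let max_r := pyMaxId (sig_a.map Prod.fst)
    let max_c := pyMaxId (sig_a.map Prod.snd)
    let table : List (String × (Int → Int → Int × Int)) :=
      [("flip_h", fun r c => (r, max_c - c)),
       ("flip_v", fun r c => (max_r - r, c)),
       ("rot180", fun r c => (max_r - r, max_c - c)),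
       ("rot90",  fun r c => (c, max_r - r)),
       ("rot270", fun r c => (max_c - c, r))]
    (table.find? fun nf => pyDictEq (bCounts (sig_a.map fun p => nf.2 p.1 p.2)) target).map Prod.fst

-- ===== PRECONDITION & SPEC =====
def Spec_shape_match_py (sig_a : List (Int × Int)) (sig_b : List (Int × Int)) (out : Option String) : Prop := out = shape_match_py_alt sig_a sig_b
instance (sig_a : List (Int × Int)) (sig_b : List (Int × Int)) (out : Option String) : Decidable (Spec_shape_match_py sig_a sig_b out) := by unfold Spec_shape_match_py; infer_instance

-- ===== CLAIM =====
def Claim_equal_shape_match_py : Prop := ∀ (sig_a : List (Int × Int)) (sig_b : List (Int × Int)), Dom_shape_match_py sig_a sig_b → Spec_shape_match_py sig_a sig_b (shape_match_py sig_a sig_b)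

-- ===== LEMMAS AND PROOFS =====

-- B's 'x <= y' on pairs is lexicographic ≤
theorem pairLe_iff (p q : Int × Int) : pairLe p q = true ↔ toLex p ≤ toLex q := by
  simp [pairLe, Prod.Lex.toLex_le_toLex]

-- the comparison sorted2 uses with keys fst/snd is lexicographic <
theorem before_eq (p q : Int × Int) :
    (decide (p.1 < q.1) || (!decide (q.1 < p.1) && decide (p.2 < q.2))) = decide (toLex p < toLex q) := by
  rw [Bool.eq_iff_iff]
  simp only [Bool.or_eq_true, Bool.and_eq_true, Bool.not_eq_true', decide_eq_true_eq,
    decide_eq_false_iff_not, Prod.Lex.toLex_lt_toLex]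
  omega

theorem insertBy_congr {α : Type} (f g : α → α → Bool) (h : ∀ x y, f x y = g x y) (x : α) :
    ∀ ys : List α, PySem.List.insertBy f x ys = PySem.List.insertBy g x ys := by
  intro ys
  induction ys with
  | nil => rfl
  | cons y ys ih => simp only [PySem.List.insertBy, h, ih]

theorem sorted2_eq_sorted_lex (X : List (Int × Int)) :
    PySem.List.sorted2 X Prod.fst Prod.snd =
      PySem.List.sorted X (fun p => toLex p : Int × Int → Lex (Int × Int)) := by
  simp only [PySem.List.sorted2, PySem.List.sorted, if_neg (by decide : ¬ (false = true))]
  have : (fun (acc : List (Int × Int)) x =>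
            PySem.List.insertBy (fun a b => decide (a.1 < b.1) || (!decide (b.1 < a.1) && decide (a.2 < b.2))) x acc) =
         (fun acc x => PySem.List.insertBy (fun a b => decide (toLex a < toLex b)) x acc) := by
    funext acc x
    exact insertBy_congr _ _ (fun a b => before_eq a b) x acc
  rw [this]

-- the sorted order, named: tuple(sorted(X)) = b iff b is a lex-nondecreasing rearrangement of X
theorem sorted2_eq_iff (X b : List (Int × Int)) :
    PySem.List.sorted2 X Prod.fst Prod.snd = b ↔
      X.Perm b ∧ b.Pairwise (fun p q => toLex p ≤ toLex q) := by
  rw [sorted2_eq_sorted_lex]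
  constructor
  · rintro rfl
    exact ⟨(PySem.List.sorted_perm X _ false).symm, PySem.List.sorted_pairwise X _⟩
  · rintro ⟨hperm, hpw⟩
    exact PySem.List.eq_of_perm_of_pairwise_le_of_injective (fun p => toLex p) toLex.injective
      ((PySem.List.sorted_perm X _ false).trans hperm)
      (PySem.List.sorted_pairwise X _) hpw

-- B's consecutive-pairs check is exactly pairwise lex-nondecreasing
theorem allZip_iff (b : List (Int × Int)) :
    ((b.zip (PySem.List.slice b (some 1) none)).all fun q => pairLe q.1 q.2) = true ↔
      b.Pairwise (fun p q => toLex p ≤ toLex q) := by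
  rw [PySem.List.slice_from_one]
  rw [← @List.isChain_iff_pairwise (Int × Int) (fun p q => toLex p ≤ toLex q) b
        ⟨fun hab hbc => le_trans hab hbc⟩]
  induction b with
  | nil => simp
  | cons p rest ih =>
    cases rest with
    | nil => simp
    | cons q rest' =>
      simp only [List.tail_cons, List.zip_cons_cons, List.all_cons, Bool.and_eq_true,
        pairLe_iff, List.isChain_cons_cons] at *
      rw [ih]

-- the count dict built by B is Counter
theorem bCounts_eq (xs : List (Int × Int)) : bCounts xs = PySem.Dict.counter xs :=
  PySem.Dict.foldl_insert_getD_add_one_eq_counter xs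

theorem get?_counter (ys : List (Int × Int)) (k : Int × Int) :
    (PySem.Dict.counter ys).get? k = if k ∈ ys then some ((ys.count k : Int)) else none := by
  by_cases h : k ∈ ys
  · rw [if_pos h]
    refine PySem.Dict.get?_of_mem_items _ ?_ (PySem.Dict.nodup_keys_counter ys)
    rw [PySem.Dict.items_counter]
    exact List.mem_map.mpr ⟨k, (PySem.Set.mem_ofList ys k).mpr h, rfl⟩
  · rw [if_neg h, PySem.Dict.get?_eq_none_iff_not_mem_keys, PySem.Dict.keys_counter]
    exact fun hm => h ((PySem.Set.mem_ofList ys k).mp hm)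

-- Python 'Counter-dicts equal' is multiset equality
theorem pyDictEq_iff (xs ys : List (Int × Int)) :
    pyDictEq (bCounts xs) (bCounts ys) = true ↔ xs.Perm ys := by
  rw [bCounts_eq, bCounts_eq]
  simp only [pyDictEq, Bool.and_eq_true, beq_iff_eq, List.all_eq_true, PySem.Dict.items_counter]
  constructor
  · rintro ⟨hlen, hall⟩
    have hcnt : ∀ k : Int × Int, k ∈ xs → k ∈ ys ∧ (List.count k ys : Int) = (List.count k xs : Int) := by
      intro k hk
      have h1 := hall (k, (List.count k xs : Int))
        (List.mem_map.mpr ⟨k, (PySem.Set.mem_ofList xs k).mpr hk, rfl⟩)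
      simp only [get?_counter] at h1
      by_cases hky : k ∈ ys
      · rw [if_pos hky] at h1
        exact ⟨hky, Option.some.inj h1⟩
      · rw [if_neg hky] at h1; cases h1
    have hsub : PySem.Set.ofList xs ⊆ PySem.Set.ofList ys := by
      intro k hk
      exact (PySem.Set.mem_ofList ys k).mpr
        (hcnt k ((PySem.Set.mem_ofList xs k).mp hk)).1
    have hperm : (PySem.Set.ofList xs).Perm (PySem.Set.ofList ys) := by
      refine ((PySem.Set.nodup_ofList xs).subperm hsub).perm_of_length_le ?_
      simp only [List.length_map] at hlen
      omega
    refine List.perm_iff_count.mpr (fun k => ?_)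
    by_cases hk : k ∈ xs
    · exact_mod_cast (hcnt k hk).2.symm
    · have hky : k ∉ ys := by
        intro hky
        exact hk ((PySem.Set.mem_ofList xs k).mp
          (hperm.mem_iff.mpr ((PySem.Set.mem_ofList ys k).mpr hky)))
      rw [List.count_eq_zero_of_not_mem hk, List.count_eq_zero_of_not_mem hky]
  · intro hperm
    have hmem : ∀ k : Int × Int, k ∈ xs ↔ k ∈ ys := fun k => hperm.mem_iff
    have hsets : (PySem.Set.ofList xs).Perm (PySem.Set.ofList ys) := by
      refine (List.perm_ext_iff_of_nodup (PySem.Set.nodup_ofList xs) (PySem.Set.nodup_ofList ys)).mpr ?_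
      intro k
      rw [PySem.Set.mem_ofList, PySem.Set.mem_ofList]
      exact hmem k
    refine ⟨by simp [hsets.length_eq], ?_⟩
    rintro kv hkv
    rcases List.mem_map.mp hkv with ⟨k, hk, rfl⟩
    have hky : k ∈ ys := (hmem k).mp ((PySem.Set.mem_ofList xs k).mp hk)
    simp only [get?_counter, if_pos hky, hperm.count_eq k]

-- anything equal to a sorted2 result is pairwise-sorted
theorem pairwise_of_sorted2_eq {X b : List (Int × Int)}
    (h : PySem.List.sorted2 X Prod.fst Prod.snd = b) :
    b.Pairwise (fun p q => toLex p ≤ toLex q) := ((sorted2_eq_iff X b).mp h).2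

-- combined condition: one transform's sorted tuple equals sig_b ↔ B's dict comparison fires
theorem cond_iff (X b : List (Int × Int))
    (hpw : b.Pairwise (fun p q => toLex p ≤ toLex q)) :
    PySem.List.sorted2 X Prod.fst Prod.snd = b ↔ pyDictEq (bCounts X) (bCounts b) = true := by
  rw [sorted2_eq_iff, pyDictEq_iff]
  exact ⟨fun h => h.1, fun h => ⟨h, hpw⟩⟩

theorem shape_match_eq (sig_a sig_b : List (Int × Int)) :
    shape_match_py sig_a sig_b = shape_match_py_alt sig_a sig_b := by
  by_cases hab : sig_a = sig_b
  · simp [shape_match_py, shape_match_py_alt, hab]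
  · by_cases ha : sig_a = []
    · subst ha
      simp [shape_match_py, shape_match_py_alt, hab]
    · simp only [shape_match_py, shape_match_py_alt, if_neg hab, ne_eq, ha,
        not_false_iff, true_and]
      by_cases hs : ((sig_b.zip (PySem.List.slice sig_b (some 1) none)).all fun q => pairLe q.1 q.2) = true
      · conv_rhs => rw [if_neg (not_not_intro hs)]
        have hpw := (allZip_iff sig_b).mp hs
        have e1 : (aFlipH sig_a = sig_b) ↔ pyDictEq (bCounts (sig_a.map fun p => (p.1, pyMaxId (sig_a.map Prod.snd) - p.2))) (bCounts sig_b) = true := cond_iff _ sig_b hpw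
        have e2 : (aFlipV sig_a = sig_b) ↔ pyDictEq (bCounts (sig_a.map fun p => (pyMaxId (sig_a.map Prod.fst) - p.1, p.2))) (bCounts sig_b) = true := cond_iff _ sig_b hpw
        have e3 : (aRot180 sig_a = sig_b) ↔ pyDictEq (bCounts (sig_a.map fun p => (pyMaxId (sig_a.map Prod.fst) - p.1, pyMaxId (sig_a.map Prod.snd) - p.2))) (bCounts sig_b) = true := cond_iff _ sig_b hpw
        have e4 : (aRot90 sig_a = sig_b) ↔ pyDictEq (bCounts (sig_a.map fun p => (p.2, pyMaxId (sig_a.map Prod.fst) - p.1))) (bCounts sig_b) = true := cond_iff _ sig_b hpw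
        have e5 : (aRot270 sig_a = sig_b) ↔ pyDictEq (bCounts (sig_a.map fun p => (pyMaxId (sig_a.map Prod.snd) - p.2, p.1))) (bCounts sig_b) = true := cond_iff _ sig_b hpw
        cases h1 : pyDictEq (bCounts (sig_a.map fun p => (p.1, pyMaxId (sig_a.map Prod.snd) - p.2))) (bCounts sig_b) with
        | true => simp [List.find?, h1, e1]
        | false =>
          cases h2 : pyDictEq (bCounts (sig_a.map fun p => (pyMaxId (sig_a.map Prod.fst) - p.1, p.2))) (bCounts sig_b) with
          | true => simp [List.find?, h1, h2, e1, e2]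
          | false =>
            cases h3 : pyDictEq (bCounts (sig_a.map fun p => (pyMaxId (sig_a.map Prod.fst) - p.1, pyMaxId (sig_a.map Prod.snd) - p.2))) (bCounts sig_b) with
            | true => simp [List.find?, h1, h2, h3, e1, e2, e3]
            | false =>
              cases h4 : pyDictEq (bCounts (sig_a.map fun p => (p.2, pyMaxId (sig_a.map Prod.fst) - p.1))) (bCounts sig_b) with
              | true => simp [List.find?, h1, h2, h3, h4, e1, e2, e3, e4]
              | false =>
                cases h5 : pyDictEq (bCounts (sig_a.map fun p => (pyMaxId (sig_a.map Prod.snd) - p.2, p.1))) (bCounts sig_b) with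
                | true => simp [List.find?, h1, h2, h3, h4, h5, e1, e2, e3, e4, e5]
                | false => simp [List.find?, h1, h2, h3, h4, h5, e1, e2, e3, e4, e5]
      · conv_rhs => rw [if_pos hs]
        have hnpw : ¬ sig_b.Pairwise (fun p q => toLex p ≤ toLex q) :=
          fun h => hs ((allZip_iff sig_b).mpr h)
        have n1 : ¬ (aFlipH sig_a = sig_b) := fun h => hnpw (pairwise_of_sorted2_eq h)
        have n2 : ¬ (aFlipV sig_a = sig_b) := fun h => hnpw (pairwise_of_sorted2_eq h)
        have n3 : ¬ (aRot180 sig_a = sig_b) := fun h => hnpw (pairwise_of_sorted2_eq h)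
        have n4 : ¬ (aRot90 sig_a = sig_b) := fun h => hnpw (pairwise_of_sorted2_eq h)
        have n5 : ¬ (aRot270 sig_a = sig_b) := fun h => hnpw (pairwise_of_sorted2_eq h)
        rw [if_neg n1, if_neg n2, if_neg n3, if_neg n4, if_neg n5]
        simp

-- ===== VERDICT =====
theorem shape_match_py_spec : Claim_equal_shape_match_py := by
  intro sig_a sig_b _
  unfold Spec_shape_match_py
  exact shape_match_eq sig_a sig_b
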